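-- pv_equiv track=rewrite | github.com/ChernyshevZahar/python_tz | ls_1/program.py | craate_img
-- ===== SOURCE A (Python) =====
-- def craate_img(list):
--     img = ''
--     for col in range(list[0]+1):
--         for row in range(list[1]+1):
--             if row == 0 or row == list[1]:
--                 img += '|'
--             elif col == 0 or col == list[0]:
--                 img += '-'
--             else:
--                 img += ' '
--         img +='\n'
--     return img
-- ===== SOURCE B (Python) =====
-- def craate_img(list):
--     rows, cols = list[0], list[1]
--
--     def line(fill):
--         return '|' + fill * (cols - 1) + '|' if cols > 0 else '|'
--
--     return ''.join(line('-' if c in (0, rows) else ' ') + '\n'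
--                    for c in range(rows + 1))
-- ===== Notes on version B (the rewrite author's own statement) =====
-- stated objective: simpler
-- what changed: B builds each of the rows+1 lines once as '|' + fill*(cols-1) + '|' (a lone '|' for width 0) and joins them, instead of A's character-by-character nested loop; Pre_ excludes lists shorter than 2 (A raises IndexError there unless it never enters the loop, while B reads list[1] up front) and negative widths, which lie outside the natural domain and where A's bar-less newline-only lines are an artifact of the empty inner range.
-- outside the precondition, e.g. on craate_img([1]): A raises IndexError, B raises IndexError; on craate_img([-1]): A returns '', B raises IndexError; on craate_img([1, -2]): A returns '\n\n', B returns '|\n|\n'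
import Mathlib
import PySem

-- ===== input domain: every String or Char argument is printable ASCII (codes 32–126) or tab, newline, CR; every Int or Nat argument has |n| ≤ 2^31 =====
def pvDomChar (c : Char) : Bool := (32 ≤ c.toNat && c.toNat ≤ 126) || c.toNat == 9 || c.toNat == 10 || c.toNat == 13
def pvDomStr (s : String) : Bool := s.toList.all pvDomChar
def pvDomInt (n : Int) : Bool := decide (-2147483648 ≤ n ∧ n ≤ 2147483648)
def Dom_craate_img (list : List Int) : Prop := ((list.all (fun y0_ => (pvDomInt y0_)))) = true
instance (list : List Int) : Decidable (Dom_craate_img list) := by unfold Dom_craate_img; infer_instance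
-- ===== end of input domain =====

-- B builds each of the rows+1 lines once and joins them, instead of A's
-- character-by-character nested loop; objective: simpler.

-- ===== PORT A =====
def craate_img (list : List Int) : String :=
  (PySem.List.pyRange 0 (PySem.List.pyGetD list 0 0 + 1) 1).foldl (fun img col =>
    ((PySem.List.pyRange 0 (PySem.List.pyGetD list 1 0 + 1) 1).foldl (fun img row =>
      if row = 0 ∨ row = PySem.List.pyGetD list 1 0 then img ++ "|"
      else if col = 0 ∨ col = PySem.List.pyGetD list 0 0 then img ++ "-"
      else img ++ " ") img) ++ "\n") ""

-- ===== PORT B =====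
def craate_img_alt (list : List Int) : String :=
  let rows := PySem.List.pyGetD list 0 0
  let cols := PySem.List.pyGetD list 1 0
  let line : Char → String := fun fill =>
    if 0 < cols then "|" ++ String.ofList (List.replicate (cols - 1).toNat fill) ++ "|" else "|"
  String.join ((PySem.List.pyRange 0 (rows + 1) 1).map
    (fun c => line (if c = 0 ∨ c = rows then '-' else ' ') ++ "\n"))

-- ===== PRECONDITION & SPEC =====
-- Pre_ excludes lists shorter than 2 (Python A raises IndexError on list[1] whenever the
-- outer loop runs, and B reads list[1] up front) and negative widths, which are outside
-- the natural domain: there A's bar-less newline-only lines are an artifact of the empty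
-- inner range.
def Pre_craate_img (list : List Int) : Prop :=
  2 ≤ list.length ∧ 0 ≤ list.getD 1 0
instance (list : List Int) : Decidable (Pre_craate_img list) := by unfold Pre_craate_img; infer_instance
def pvWitness_craate_img : List Int := [2, 3]

def Spec_craate_img (list : List Int) (out : String) : Prop := out = craate_img_alt list
instance (list : List Int) (out : String) : Decidable (Spec_craate_img list out) := by unfold Spec_craate_img; infer_instance

-- ===== CLAIM (what is proved, stated in full; the proofs are below) =====
def Claim_equal_craate_img : Prop := ∀ (list : List Int), Dom_craate_img list → Pre_craate_img list → Spec_craate_img list (craate_img list)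

-- ===== LEMMAS AND PROOFS =====

-- a fold that only appends pieces equals the starting string ++ the join of the pieces
theorem pvFoldlAppend (g : Int → String) (xs : List Int) (s : String) :
    xs.foldl (fun acc x => acc ++ g x) s = s ++ String.join (xs.map g) := by
  induction xs generalizing s with
  | nil => apply String.toList_inj.mp; simp
  | cons x xs ih => apply String.toList_inj.mp; simp [ih (s ++ g x)]

-- the inner loop of A produces "img ++ (one line, newline excluded)"
theorem pvInnerFold (b : Int) (m : String) (img : String) :
    (PySem.List.pyRange 0 (b + 1) 1).foldl (fun img row =>
        if row = 0 ∨ row = b then img ++ "|" else img ++ m) img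
      = img ++ String.join ((PySem.List.pyRange 0 (b + 1) 1).map
          (fun row => if row = 0 ∨ row = b then "|" else m)) := by
  have h : ∀ (xs : List Int) (s : String),
      xs.foldl (fun img row => if row = 0 ∨ row = b then img ++ "|" else img ++ m) s
        = xs.foldl (fun acc x => acc ++ (if x = 0 ∨ x = b then "|" else m)) s := by
    intro xs
    induction xs with
    | nil => intro s; rfl
    | cons x xs ih => intro s; by_cases hx : x = 0 ∨ x = b <;> simp [hx, ih]
  rw [h, pvFoldlAppend]

-- a map over range(lo, hi) that is constant is a replicate
theorem pvMapRangeConst (lo hi : Int) (f : Int → String) (s : String)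
    (h : ∀ r, lo ≤ r → r < hi → f r = s) :
    (PySem.List.pyRange lo hi 1).map f = List.replicate (hi - lo).toNat s := by
  rw [PySem.List.pyRange_one, List.map_map]
  have hmem : ∀ x ∈ (List.range (hi - lo).toNat).map (f ∘ fun k : Nat => lo + (k : Int)), x = s := by
    intro x hx
    simp only [List.mem_map, List.mem_range, Function.comp] at hx
    obtain ⟨k, hk, rfl⟩ := hx
    exact h _ (by omega) (by omega)
  rw [List.eq_replicate_of_mem hmem]
  simp

-- one line of A's picture, in B's closed form (m is the filler character as a string)
theorem pvLineEq (b : Int) (hb : 0 ≤ b) (c : Char) :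
    String.join ((PySem.List.pyRange 0 (b + 1) 1).map
        (fun row => if row = 0 ∨ row = b then "|" else String.ofList [c]))
      = (if 0 < b then "|" ++ String.ofList (List.replicate (b - 1).toNat c) ++ "|" else "|") := by
  by_cases h0 : b = 0
  · subst h0
    rw [PySem.List.pyRange_one_singleton]
    simp [String.join]
  · have hb1 : 1 ≤ b := by omega
    rw [PySem.List.pyRange_one_succ_right (by omega), PySem.List.pyRange_one_cons (by omega)]
    simp only [List.map_append, List.map_cons, List.map_nil,
      show (0 : Int) + 1 = 1 from rfl]
    rw [pvMapRangeConst 1 b _ (String.ofList [c])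
        (by intro r h1 h2; simp only [if_neg (by omega : ¬ (r = 0 ∨ r = b))])]
    apply String.toList_inj.mp
    simp [show 0 < b by omega]

-- ===== VERDICT (by name: the statement is the Claim_ definition above) =====
theorem craate_img_spec : Claim_equal_craate_img := by
  intro list _ hpre
  unfold Spec_craate_img craate_img craate_img_alt
  set a := PySem.List.pyGetD list 0 0 with ha_def
  set b := PySem.List.pyGetD list 1 0 with hb_def
  have hb : 0 ≤ b := by
    have h1 : 1 < list.length := by have := hpre.1; omega
    have : b = list.getD 1 0 := by
      simp [hb_def, PySem.List.pyGetD, PySem.List.pyGet?, PySem.List.pyIdx?, h1,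
        List.getD, List.getElem?_eq_getElem h1]
    rw [this]; exact hpre.2
  -- rewrite the outer fold of A into a join of per-line strings
  have hbody : (fun (img : String) (col : Int) =>
      ((PySem.List.pyRange 0 (b + 1) 1).foldl (fun img row =>
        if row = 0 ∨ row = b then img ++ "|"
        else if col = 0 ∨ col = a then img ++ "-" else img ++ " ") img) ++ "\n")
      = (fun img col => img ++
          (String.join ((PySem.List.pyRange 0 (b + 1) 1).map
            (fun row => if row = 0 ∨ row = b then "|"
              else if col = 0 ∨ col = a then "-" else " ")) ++ "\n")) := by
    funext img col
    by_cases hc : col = 0 ∨ col = a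
    · simp only [if_pos hc, pvInnerFold b "-" img]
      apply String.toList_inj.mp; simp
    · simp only [if_neg hc, pvInnerFold b " " img]
      apply String.toList_inj.mp; simp
  rw [hbody, pvFoldlAppend]
  -- each of A's lines is B's line for the corresponding filler character
  have hmap : (fun col : Int => String.join ((PySem.List.pyRange 0 (b + 1) 1).map
        (fun row => if row = 0 ∨ row = b then "|"
          else if col = 0 ∨ col = a then "-" else " ")) ++ "\n")
      = (fun col : Int =>
          (if 0 < b then "|" ++ String.ofList (List.replicate (b - 1).toNat
              (if col = 0 ∨ col = a then '-' else ' ')) ++ "|" else "|") ++ "\n") := by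
    funext col
    by_cases hc : col = 0 ∨ col = a
    · have hfun : (fun row : Int => if row = 0 ∨ row = b then "|"
          else if col = 0 ∨ col = a then "-" else " ")
          = (fun row : Int => if row = 0 ∨ row = b then "|" else String.ofList ['-']) := by
        funext row
        by_cases hr : row = 0 ∨ row = b
        · simp [hr]
        · simp [hr, hc]
      rw [hfun, pvLineEq b hb '-', if_pos hc]
    · have hfun : (fun row : Int => if row = 0 ∨ row = b then "|"
          else if col = 0 ∨ col = a then "-" else " ")
          = (fun row : Int => if row = 0 ∨ row = b then "|" else String.ofList [' ']) := by
        funext row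
        by_cases hr : row = 0 ∨ row = b
        · simp [hr]
        · simp [hr, hc]
      rw [hfun, pvLineEq b hb ' ', if_neg hc]
  rw [hmap]
  apply String.toList_inj.mp
  simp
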